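-- pv_equiv track=rewrite | github.com/ReethaElancheral/python | weekly-test-27-07-25/02_contact_book/contacts/contact_manager.py | group_contacts
-- ===== SOURCE A (Python) =====
-- def group_contacts(contacts):
--     grouped = {}
--     for contact in contacts:
--         category = contact["category"]
--         if category not in grouped:
--             grouped[category] = []
--         grouped[category].append(contact)
--     return grouped
-- ===== SOURCE B (Python) =====
-- def group_contacts(contacts):
--     # Two-phase: first-seen distinct categories, then one filter pass per category.
--     cats = dict.fromkeys(contact["category"] for contact in contacts)
--     return {cat: [c for c in contacts if c["category"] == cat] for cat in cats}
-- ===== Notes on version B (the rewrite author's own statement) =====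
-- stated objective: alternative
-- what changed: A builds the grouping in a single accumulation pass over a dict of mutable lists; B first computes the distinct categories in first-seen order with dict.fromkeys and then builds each group by filtering the whole contact list per category (index-then-filter, nested passes).
import Mathlib
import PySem

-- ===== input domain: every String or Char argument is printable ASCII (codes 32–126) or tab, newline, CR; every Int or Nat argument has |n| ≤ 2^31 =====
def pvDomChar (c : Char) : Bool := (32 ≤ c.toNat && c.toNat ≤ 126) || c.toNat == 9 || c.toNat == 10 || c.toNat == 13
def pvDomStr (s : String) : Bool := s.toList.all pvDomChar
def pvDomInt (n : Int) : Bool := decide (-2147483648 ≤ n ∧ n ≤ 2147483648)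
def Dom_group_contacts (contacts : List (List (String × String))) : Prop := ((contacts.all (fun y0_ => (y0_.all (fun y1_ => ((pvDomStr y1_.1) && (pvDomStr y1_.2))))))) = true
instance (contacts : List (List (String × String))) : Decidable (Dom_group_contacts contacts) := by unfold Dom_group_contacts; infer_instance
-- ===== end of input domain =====

-- B replaces A's single accumulation pass with a two-phase index-then-filter computation
-- (distinct categories first, then one filter pass per category); objective: alternative.

-- contact["category"]: first-match lookup in the contact dict; the `none` (KeyError) case
-- is excluded by Pre_group_contacts, `getD ""` is never reached there.
def pvCat (c : List (String × String)) : String :=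
  ((PySem.Dict.mk c).get? "category").getD ""

-- ===== PORT A =====
def group_contacts (contacts : List (List (String × String))) : List (String × List (List (String × String))) :=
  (contacts.foldl
    (fun grouped contact =>
      let category := pvCat contact
      let grouped' := if grouped.contains category then grouped
                      else grouped.insert category ([] : List (List (String × String)))
      grouped'.modify category [] (fun l => l ++ [contact]))
    PySem.Dict.empty).items

-- ===== PORT B =====
def group_contacts_alt (contacts : List (List (String × String))) : List (String × List (List (String × String))) :=
  let cats := PySem.List.dedup (contacts.map pvCat)
  cats.map (fun cat => (cat, contacts.filter (fun c => pvCat c == cat)))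

-- ===== PRECONDITION & SPEC =====
-- Pre_ excludes exactly the contacts lacking a "category" key, on which Python A raises KeyError.
def Pre_group_contacts (contacts : List (List (String × String))) : Prop :=
  ∀ c ∈ contacts, "category" ∈ c.map Prod.fst
instance (contacts : List (List (String × String))) : Decidable (Pre_group_contacts contacts) := by unfold Pre_group_contacts; infer_instance

def pvWitness_group_contacts : (List (List (String × String))) :=
  [[("category", "friends"), ("name", "Ann")], [("category", "work"), ("name", "Bob")]]

def Spec_group_contacts (contacts : List (List (String × String))) (out : List (String × List (List (String × String)))) : Prop := out = group_contacts_alt contacts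
instance (contacts : List (List (String × String))) (out : List (String × List (List (String × String)))) : Decidable (Spec_group_contacts contacts out) := by unfold Spec_group_contacts; infer_instance

-- ===== CLAIM (what is proved, stated in full; the proofs are below) =====
def Claim_equal_group_contacts : Prop := ∀ (contacts : List (List (String × String))), Dom_group_contacts contacts → Pre_group_contacts contacts → Spec_group_contacts contacts (group_contacts contacts)

-- ===== LEMMAS AND PROOFS =====

-- A's two-step body (ensure the key exists, then append) is one `modify`.
theorem pv_step_eq (d : PySem.Dict String (List (List (String × String))))
    (cat : String) (c : List (String × String)) :
    (if d.contains cat then d else d.insert cat []).modify cat [] (fun l => l ++ [c])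
      = d.modify cat [] (fun l => l ++ [c]) := by
  by_cases h : d.contains cat = true
  · simp [h]
  · have h' : d.contains cat = false := by simpa using h
    simp only [h', Bool.false_eq_true, if_false]
    show (d.insert cat []).insert cat (((d.insert cat []).getD cat []) ++ [c])
        = d.insert cat ((d.getD cat []) ++ [c])
    rw [PySem.Dict.getD_insert_self, PySem.Dict.insert_insert_self]
    simp [PySem.Dict.getD_of_not_contains, h']

theorem group_contacts_spec : Claim_equal_group_contacts := by
  intro contacts _ _
  unfold Spec_group_contacts group_contacts group_contacts_alt
  simp only [pv_step_eq]
  set D := contacts.foldl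
      (fun d c => d.modify (pvCat c) [] (fun l => l ++ [c])) PySem.Dict.empty with hD
  have hkeys : D.keys = PySem.Set.ofList (contacts.map pvCat) := by
    rw [hD, PySem.Dict.keys_foldl_modify_key, PySem.Dict.keys_empty,
      PySem.Set.update_nil_left]
  have hnd : D.keys.Nodup := by
    rw [hD]; exact PySem.Dict.nodup_keys_foldl_modify_key contacts pvCat []
      (fun _ c => fun l => l ++ [c]) PySem.Dict.empty (by simp [PySem.Dict.keys_empty])
  have hget : ∀ cat, D.getD cat [] = contacts.filter (fun c => pvCat c == cat) := by
    intro cat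
    have hmap : D = (contacts.map (fun c => (pvCat c, c))).foldl
        (fun d p => d.modify p.1 [] (fun l => l ++ [p.2])) PySem.Dict.empty := by
      rw [hD, List.foldl_map]
    rw [hmap, PySem.Dict.getD_foldl_modify_append, PySem.Dict.getD_empty]
    simp [List.filter_map, Function.comp_def, List.map_map]
  rw [PySem.Dict.items_eq_map_keys D hnd [], hkeys]
  simp only [PySem.List.dedup_eq_ofList]
  exact List.map_congr_left (fun cat _ => by rw [hget cat])
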